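-- pv_equiv track=rewrite | github.com/raikoug/AoCv2 | python/aoc_solutions/2015/day_20.py | divisori
-- ===== SOURCE A (Python) =====
-- from collections import Counter
-- from itertools import product
--
-- def divisori(lst):
--     counts = Counter(lst)
--     elements = list(counts.keys())
--     max_counts = [counts[elem] for elem in elements]
--
--     # Genera tutte le possibili combinazioni di conteggi per gli elementi
--     count_combinations = [range(count + 1) for count in max_counts]
--
--     # Genera tutte le combinazioni possibili rispettando i conteggi massimi
--     all_combinations = list()
--     for counts in product(*count_combinations):
--         if any(counts):  # Esclude la combinazione con tutti zero
--             combination = []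
--             for elem, count in zip(elements, counts):
--                 combination.extend([elem] * count)
--             # Ordina la combinazione per evitare duplicati come [5, 2] e [2, 5]
--             all_combinations.append(sorted(combination))
--
--     # Rimuove eventuali duplicati
--     unique_combinations = []
--     [unique_combinations.append(x) for x in all_combinations if x not in unique_combinations]
--     return unique_combinations
-- ===== SOURCE B (Python) =====
-- from collections import Counter
--
-- def divisori(lst):
--     counts = Counter(lst)
--     elems = list(counts)
--     bases = [counts[e] + 1 for e in elems]
--     total = 1
--     for b in bases:
--         total *= b
--     out = []
--     for n in range(1, total):
--         m, rem = [], n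
--         for e, b in zip(reversed(elems), reversed(bases)):
--             rem, d = divmod(rem, b)
--             m = [e] * d + m
--         out.append(sorted(m))
--     return out
-- ===== Notes on version B (the rewrite author's own statement) =====
-- stated objective: alternative
-- what changed: B replaces A's materialised itertools.product of count-ranges, per-vector zip/extend rebuilds and quadratic membership dedup pass by mixed-radix index arithmetic: a single loop over n in range(1, total) that decodes each index into its count vector by repeated divmod, with no dedup pass at all.
import Mathlib
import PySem

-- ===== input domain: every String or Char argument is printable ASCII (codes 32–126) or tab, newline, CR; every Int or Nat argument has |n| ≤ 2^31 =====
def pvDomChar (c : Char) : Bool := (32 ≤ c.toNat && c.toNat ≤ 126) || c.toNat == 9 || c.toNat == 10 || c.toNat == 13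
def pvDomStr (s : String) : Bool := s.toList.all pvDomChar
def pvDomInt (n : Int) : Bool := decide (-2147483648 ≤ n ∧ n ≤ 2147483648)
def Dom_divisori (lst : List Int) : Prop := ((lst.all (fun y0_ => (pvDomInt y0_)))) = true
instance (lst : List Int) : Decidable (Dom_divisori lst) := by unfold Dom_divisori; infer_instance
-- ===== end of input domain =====

-- B replaces A's materialised cartesian product of count ranges (plus quadratic dedup pass)
-- by mixed-radix index arithmetic: one loop over n in range(1, total) decoding each index into
-- a count vector by repeated divmod; objective: alternative (the dedup scan disappears).

-- ===== PORT A =====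
-- itertools.product over a list of ranges (first list varies slowest, as in Python)
def pyProduct : List (List Int) → List (List Int)
  | [] => [[]]
  | r :: rs => r.flatMap (fun x => (pyProduct rs).map (fun cs => x :: cs))

def divisori (lst : List Int) : List (List Int) :=
  let counts := PySem.Dict.counter lst
  let elements := counts.keys
  let maxCounts := elements.map (fun e => counts.getD e 0)
  let countCombinations := maxCounts.map (fun c => PySem.List.pyRange 0 (c + 1) 1)
  let allCombinations := (pyProduct countCombinations).foldl
    (fun acc cs =>
      if cs.any (fun c => c ≠ 0) then
        acc ++ [PySem.List.sorted
          ((elements.zip cs).foldl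
            (fun comb p => comb ++ List.replicate p.2.toNat p.1) [])
          (fun x => x) false]
      else acc) []
  allCombinations.foldl (fun u x => if x ∈ u then u else u ++ [x]) []

-- ===== PORT B =====
def divisori_alt (lst : List Int) : List (List Int) :=
  let counts := PySem.Dict.counter lst
  let elems := counts.keys
  let bases := elems.map (fun e => counts.getD e 0 + 1)
  let total := bases.foldl (· * ·) 1
  (PySem.List.pyRange 1 total 1).map (fun n =>
    let m := ((elems.reverse.zip bases.reverse).foldl
      (fun (st : Int × List Int) p =>
        (PySem.Int.floordiv st.1 p.2,
         List.replicate (PySem.Int.mod st.1 p.2).toNat p.1 ++ st.2))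
      (n, [])).2
    PySem.List.sorted m (fun x => x) false)

-- ===== PRECONDITION & SPEC =====
def Spec_divisori (lst : List Int) (out : List (List Int)) : Prop := out = divisori_alt lst
instance (lst : List Int) (out : List (List Int)) : Decidable (Spec_divisori lst out) := by unfold Spec_divisori; infer_instance

-- ===== CLAIM (what is proved, stated in full; the proofs are below) =====
def Claim_equal_divisori : Prop := ∀ (lst : List Int), Dom_divisori lst → Spec_divisori lst (divisori lst)

-- ===== LEMMAS AND PROOFS =====

-- expand an element list and a parallel count list into a multiset-as-list
def expnd : List Int → List Int → List Int
  | e :: es, c :: cs => List.replicate c.toNat e ++ expnd es cs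
  | _, _ => []

-- product of a list of Ints, as B's total loop computes it
def prodl (bs : List Int) : Int := bs.foldl (· * ·) 1

-- mixed-radix decoding, most significant digit first
def decM : List Int → Int → List Int
  | [], _ => []
  | b :: bs, n => (n / prodl bs) % b :: decM bs n

theorem foldl_mul_shift (bs : List Int) : ∀ a : Int, bs.foldl (· * ·) a = a * prodl bs := by
  induction bs with
  | nil => intro a; rw [prodl]; simp
  | cons b bs ih =>
    intro a
    rw [List.foldl_cons, ih]
    conv_rhs => rw [prodl, List.foldl_cons, ih]
    ring

theorem prodl_cons (b : Int) (bs : List Int) : prodl (b :: bs) = b * prodl bs := by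
  conv_lhs => rw [prodl, List.foldl_cons, foldl_mul_shift]
  ring

theorem prodl_pos {bs : List Int} (h : ∀ b ∈ bs, 0 < b) : 0 < prodl bs := by
  induction bs with
  | nil => simp [prodl]
  | cons b bs ih =>
    rw [prodl_cons]
    exact mul_pos (h b (by simp)) (ih (fun x hx => h x (by simp [hx])))

theorem prodl_snoc (bs : List Int) (b : Int) : prodl (bs ++ [b]) = prodl bs * b := by
  simp [prodl, List.foldl_append]

theorem length_decM (bs : List Int) (n : Int) : (decM bs n).length = bs.length := by
  induction bs generalizing n with
  | nil => simp [decM]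
  | cons b bs ih => simp [decM, ih]

theorem expnd_snoc (es cs : List Int) (e c : Int) (h : es.length = cs.length) :
    expnd (es ++ [e]) (cs ++ [c]) = expnd es cs ++ List.replicate c.toNat e := by
  induction es generalizing cs with
  | nil =>
    simp only [List.length_nil] at h
    rw [List.length_eq_zero_iff.mp h.symm]
    simp [expnd]
  | cons x es ih =>
    cases cs with
    | nil => simp at h
    | cons c' cs =>
      simp only [List.cons_append, expnd]
      rw [ih cs (by simpa using h)]
      simp [List.append_assoc]

theorem decM_snoc {xs : List Int} {b : Int} (hxs : ∀ x ∈ xs, 0 < x) (hb : 0 < b) (n : Int) :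
    decM (xs ++ [b]) n = decM xs (n / b) ++ [n % b] := by
  induction xs generalizing n with
  | nil => simp [decM, prodl]
  | cons x xs ih =>
    simp only [List.cons_append, decM]
    rw [prodl_snoc, ih (fun y hy => hxs y (by simp [hy]))]
    rw [mul_comm (prodl xs) b, ← Int.ediv_ediv_of_nonneg hb.le]

theorem decM_mod {bs : List Int} (hpos : ∀ b ∈ bs, 0 < b) {r x : Int}
    (hr : 0 ≤ r) (hx : 0 ≤ x) : decM bs (r + x * prodl bs) = decM bs r := by
  induction bs generalizing x with
  | nil => simp [decM]
  | cons b bs ih =>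
    have hb : 0 < b := hpos b (by simp)
    have hP : 0 < prodl bs := prodl_pos (fun y hy => hpos y (by simp [hy]))
    simp only [decM, prodl_cons, List.cons.injEq]
    have h1 : r + x * (b * prodl bs) = r + (x * b) * prodl bs := by ring
    refine ⟨?_, ?_⟩
    · rw [h1, Int.add_mul_ediv_right _ _ hP.ne', Int.add_mul_emod_self_right]
    · rw [h1, ih (fun y hy => hpos y (by simp [hy])) (by positivity)]

theorem decM_split {bs : List Int} {b : Int} (hpos : ∀ y ∈ bs, 0 < y) (hb : 0 < b)
    {x r : Int} (hx : 0 ≤ x) (hxb : x < b) (hr : 0 ≤ r) (hrP : r < prodl bs) :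
    decM (b :: bs) (x * prodl bs + r) = x :: decM bs r := by
  have hP : 0 < prodl bs := prodl_pos hpos
  simp only [decM, List.cons.injEq]
  have h1 : x * prodl bs + r = r + x * prodl bs := by ring
  refine ⟨?_, ?_⟩
  · rw [h1, Int.add_mul_ediv_right _ _ hP.ne', Int.ediv_eq_zero_of_lt hr hrP]
    rw [zero_add, Int.emod_eq_of_lt hx hxb]
  · rw [h1, decM_mod hpos hr hx]

theorem decM_zero {bs : List Int} (hpos : ∀ b ∈ bs, 0 < b) :
    decM bs 0 = List.replicate bs.length 0 := by
  induction bs with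
  | nil => simp [decM]
  | cons b bs ih =>
    simp [decM, ih (fun y hy => hpos y (by simp [hy])), List.replicate_succ]

theorem decM_eq_zero_imp {bs : List Int} (hpos : ∀ b ∈ bs, 0 < b) {n : Int}
    (hn : 0 ≤ n) (hlt : n < prodl bs) (h : ∀ c ∈ decM bs n, c = 0) : n = 0 := by
  induction bs with
  | nil => simp [prodl] at hlt; omega
  | cons b bs ih =>
    have hb : 0 < b := hpos b (by simp)
    have hP : 0 < prodl bs := prodl_pos (fun y hy => hpos y (by simp [hy]))
    rw [prodl_cons] at hlt
    have hhead : (n / prodl bs) % b = 0 := h _ (by simp [decM])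
    have hdn : 0 ≤ n / prodl bs := Int.ediv_nonneg hn hP.le
    have hdb : n / prodl bs < b := by
      rw [Int.ediv_lt_iff_lt_mul hP]
      omega
    rw [Int.emod_eq_of_lt hdn hdb] at hhead
    have hnP : n < prodl bs := by
      by_contra hge
      push_neg at hge
      have : 1 ≤ n / prodl bs := by
        rw [Int.le_ediv_iff_mul_le hP]; omega
      omega
    exact ih (fun y hy => hpos y (by simp [hy])) hnP
      (fun c hc => h c (by simp [decM, hc]))

-- the three standard facts about the product of ranges (kept from the A-side analysis)
theorem zip_flatMap_expnd (es cs : List Int) :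
    (es.zip cs).flatMap (fun p => List.replicate p.2.toNat p.1) = expnd es cs := by
  induction es generalizing cs with
  | nil => cases cs <;> simp [expnd]
  | cons e es ih => cases cs with
    | nil => simp [expnd]
    | cons c cs => simp [expnd, ih]

theorem mem_pyProduct {rs : List (List Int)} {cs : List Int} :
    cs ∈ pyProduct rs ↔ List.Forall₂ (fun c r => c ∈ r) cs rs := by
  induction rs generalizing cs with
  | nil =>
    simp only [pyProduct, List.mem_singleton]
    constructor
    · rintro rfl; exact List.Forall₂.nil
    · intro h; cases h; rfl
  | cons r rs ih =>
    simp only [pyProduct, List.mem_flatMap, List.mem_map]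
    constructor
    · rintro ⟨x, hx, cs', hcs', rfl⟩
      exact List.Forall₂.cons hx (ih.mp hcs')
    · intro h
      cases h with
      | cons hx hrest => exact ⟨_, hx, _, ih.mpr hrest, rfl⟩

theorem nodup_pyProduct {rs : List (List Int)} (h : ∀ r ∈ rs, r.Nodup) :
    (pyProduct rs).Nodup := by
  induction rs with
  | nil => simp [pyProduct]
  | cons r rs ih =>
    simp only [pyProduct]
    have hr : r.Nodup := h r (by simp)
    have hp : (pyProduct rs).Nodup := ih (fun r' hr' => h r' (by simp [hr']))
    rw [List.nodup_flatMap]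
    refine ⟨fun x _ => hp.map (fun a b hab => by simpa using hab), ?_⟩
    refine hr.imp ?_
    intro a b hab l hla hlb
    simp only [List.mem_map] at hla hlb
    obtain ⟨cs, _, rfl⟩ := hla
    obtain ⟨cs', _, heq⟩ := hlb
    exact hab (by injection heq with h1 _; exact h1.symm)

-- A's pre-dedup loop characterised
theorem foldlA_eq (P : List (List Int)) (es : List Int) :
    P.foldl
      (fun acc cs =>
        if cs.any (fun c => c ≠ 0) then
          acc ++ [PySem.List.sorted
            ((es.zip cs).foldl (fun comb p => comb ++ List.replicate p.2.toNat p.1) [])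
            (fun x => x) false]
        else acc) []
    = (P.filter (fun cs => cs.any (fun c => c ≠ 0))).map
        (fun cs => PySem.List.sorted (expnd es cs) (fun x => x) false) := by
  have := PySem.List.foldl_append_if (l := P) (acc := ([] : List (List Int)))
    (p := fun cs => cs.any (fun c => c ≠ 0))
    (f := fun cs => PySem.List.sorted (expnd es cs) (fun x => x) false)
  simp only [List.nil_append] at this
  rw [← this]
  congr 1
  funext acc cs
  rw [PySem.List.foldl_append_eq_flatMap (g := fun p : Int × Int => List.replicate p.2.toNat p.1),
    List.nil_append, zip_flatMap_expnd]

theorem count_expnd_of_not_mem {e : Int} {es cs : List Int} (h : e ∉ es) :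
    (expnd es cs).count e = 0 := by
  induction es generalizing cs with
  | nil => cases cs <;> simp [expnd]
  | cons e' es ih =>
    cases cs with
    | nil => simp [expnd]
    | cons c cs =>
      simp only [expnd, List.count_append, List.count_replicate]
      rw [List.mem_cons, not_or] at h
      simp [if_neg (by simpa using Ne.symm h.1), ih h.2]

theorem expnd_inj {es : List Int} (hnd : es.Nodup) :
    ∀ {cs cs' : List Int}, cs.length = es.length → cs'.length = es.length →
    (∀ c ∈ cs, 0 ≤ c) → (∀ c ∈ cs', 0 ≤ c) →
    (expnd es cs).Perm (expnd es cs') → cs = cs' := by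
  induction es with
  | nil => intro cs cs' h1 h2 _ _ _; simp only [List.length_nil, List.length_eq_zero_iff] at h1 h2; rw [h1, h2]
  | cons e es ih =>
    intro cs cs' h1 h2 hn hn' hperm
    cases cs with | nil => simp at h1 | cons c cst =>
    cases cs' with | nil => simp at h2 | cons c' cst' =>
    rw [List.nodup_cons] at hnd
    simp only [expnd] at hperm
    have hcount := hperm.count_eq e
    simp [List.count_append,
      count_expnd_of_not_mem hnd.1] at hcount
    have hc : c = c' := by
      have h0 : 0 ≤ c := hn c (by simp)
      have h0' : 0 ≤ c' := hn' c' (by simp)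
      omega
    subst hc
    have htail : (expnd es cst).Perm (expnd es cst') := by
      rw [List.perm_iff_count] at hperm ⊢
      intro x
      have := hperm x
      simpa [List.count_append] using this
    have := ih hnd.2 (by simpa using h1) (by simpa using h2)
      (fun x hx => hn x (by simp [hx])) (fun x hx => hn' x (by simp [hx])) htail
    rw [this]

theorem foldl_dedup_of_nodup {l acc : List (List Int)} (h : (acc ++ l).Nodup) :
    l.foldl (fun u x => if x ∈ u then u else u ++ [x]) acc = acc ++ l := by
  induction l generalizing acc with
  | nil => simp
  | cons x l ih =>
    have hx : x ∉ acc := by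
      intro hmem
      exact (List.disjoint_of_nodup_append h) hmem (by simp)
    rw [List.foldl_cons, if_neg hx, ih (by simpa using h)]
    simp

theorem forall₂_nonneg {rgs : List (List Int)} {cs : List Int}
    (h : List.Forall₂ (fun c r => c ∈ r) cs rgs)
    (hr : ∀ r ∈ rgs, ∀ c ∈ r, 0 ≤ c) : ∀ c ∈ cs, 0 ≤ c := by
  induction h with
  | nil => simp
  | cons hcr _ ih =>
    intro c hc
    rcases List.mem_cons.mp hc with rfl | hc
    · exact hr _ (by simp) _ hcr
    · exact ih (fun r h1 c1 h2 => hr r (by simp [h1]) c1 h2) c hc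

-- a range of a product splits into a double range (Nat level, then Int level)
theorem range_mul_flatMap (b P : Nat) :
    List.range (b * P)
      = (List.range b).flatMap (fun x => (List.range P).map (fun r => x * P + r)) := by
  induction b with
  | zero => simp
  | succ b ih =>
    rw [Nat.succ_mul, List.range_add, ih, List.range_succ, List.flatMap_append]
    simp

theorem pyRange_mul_flatMap {b P : Int} (hb : 0 ≤ b) (hP : 0 ≤ P) :
    PySem.List.pyRange 0 (b * P) 1
      = (PySem.List.pyRange 0 b 1).flatMap
          (fun x => (PySem.List.pyRange 0 P 1).map (fun r => x * P + r)) := by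
  obtain ⟨bn, rfl⟩ := Int.eq_ofNat_of_zero_le hb
  obtain ⟨Pn, rfl⟩ := Int.eq_ofNat_of_zero_le hP
  rw [PySem.List.pyRange_one, PySem.List.pyRange_one, PySem.List.pyRange_one]
  have h1 : ((bn : Int) * (Pn : Int) - 0).toNat = bn * Pn := by
    rw [sub_zero, ← Nat.cast_mul, Int.toNat_natCast]
  have h2 : ((bn : Int) - 0).toNat = bn := by rw [sub_zero, Int.toNat_natCast]
  have h3 : ((Pn : Int) - 0).toNat = Pn := by rw [sub_zero, Int.toNat_natCast]
  rw [h1, h2, h3, range_mul_flatMap]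
  simp [List.map_flatMap, List.flatMap_map, List.map_map, Function.comp_def, Nat.cast_add, Nat.cast_mul]

-- the cartesian product of count ranges is range(total) decoded mixed-radix
theorem prod_decode (bs : List Int) (hpos : ∀ b ∈ bs, 0 < b) :
    pyProduct (bs.map (fun b => PySem.List.pyRange 0 b 1))
      = (PySem.List.pyRange 0 (prodl bs) 1).map (decM bs) := by
  induction bs with
  | nil => decide
  | cons b bs ih =>
    have hb : 0 < b := hpos b (by simp)
    have hP : 0 < prodl bs := prodl_pos (fun y hy => hpos y (by simp [hy]))
    simp only [List.map_cons, pyProduct, ih (fun y hy => hpos y (by simp [hy]))]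
    rw [prodl_cons, pyRange_mul_flatMap hb.le hP.le, List.map_flatMap]
    apply List.flatMap_congr
    intro x hx
    have hxb := PySem.List.mem_pyRange_one.mp hx
    simp only [List.map_map]
    apply List.map_congr_left
    intro r hr
    have hrb := PySem.List.mem_pyRange_one.mp hr
    simp only [Function.comp_apply]
    exact (decM_split (fun y hy => hpos y (by simp [hy])) hb hxb.1 hxb.2 hrb.1 hrb.2).symm

-- B's divmod fold builds exactly the expansion of the decoded digit vector
theorem foldB_spec (zs : List (Int × Int)) (hpos : ∀ p ∈ zs, 0 < p.2) (n : Int)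
    (hn : 0 ≤ n) (m : List Int) :
    (zs.foldl
      (fun (st : Int × List Int) p =>
        (PySem.Int.floordiv st.1 p.2,
         List.replicate (PySem.Int.mod st.1 p.2).toNat p.1 ++ st.2))
      (n, m)).2
    = expnd (zs.map Prod.fst).reverse (decM (zs.map Prod.snd).reverse n) ++ m := by
  induction zs generalizing n m with
  | nil => simp [decM, expnd]
  | cons p zs ih =>
    obtain ⟨e, b⟩ := p
    have hb : 0 < b := hpos (e, b) (by simp)
    simp only [List.foldl_cons]
    rw [PySem.Int.floordiv_eq_ediv_of_pos hb, PySem.Int.mod_eq_emod_of_pos hb]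
    rw [ih (fun q hq => hpos q (by simp [hq])) _ (Int.ediv_nonneg hn hb.le)]
    simp only [List.map_cons, List.reverse_cons]
    have hxs : ∀ x ∈ (zs.map Prod.snd).reverse, 0 < x := by
      intro x hxm
      rw [List.mem_reverse, List.mem_map] at hxm
      obtain ⟨q, hq, rfl⟩ := hxm
      exact hpos q (by simp [hq])
    rw [decM_snoc hxs hb n]
    rw [expnd_snoc _ _ e (n % b)
      (by rw [length_decM]; simp)]
    rw [List.append_assoc]

-- ===== VERDICT (by name: the statement is the Claim_ definition above) =====
theorem divisori_spec : Claim_equal_divisori := by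
  intro lst _
  unfold Spec_divisori divisori divisori_alt
  simp only [PySem.Dict.keys_counter, PySem.Dict.getD_counter]
  set es : List Int := PySem.Set.ofList lst with hes
  set bs : List Int := es.map (fun e => (lst.count e : Int) + 1) with hbs
  have hpos : ∀ b ∈ bs, 0 < b := by
    intro b hbm
    rw [hbs, List.mem_map] at hbm
    obtain ⟨e, _, rfl⟩ := hbm
    positivity
  have hT : 0 < prodl bs := prodl_pos hpos
  have hlenbe : bs.length = es.length := by rw [hbs, List.length_map]
  -- normalise A's list of ranges
  have hrgs : (es.map (fun e => (lst.count e : Int))).map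
      (fun c => PySem.List.pyRange 0 (c + 1) 1) = bs.map (fun b => PySem.List.pyRange 0 b 1) := by
    rw [hbs]
    simp [List.map_map, Function.comp_def]
  rw [foldlA_eq, hrgs]
  -- facts about members of the product
  have hlen : ∀ cs ∈ pyProduct (bs.map (fun b => PySem.List.pyRange 0 b 1)),
      cs.length = es.length := by
    intro cs hcs
    have h := (mem_pyProduct.mp hcs).length_eq
    rw [List.length_map] at h
    omega
  have hnonneg : ∀ cs ∈ pyProduct (bs.map (fun b => PySem.List.pyRange 0 b 1)),
      ∀ c ∈ cs, 0 ≤ c := by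
    intro cs hcs
    refine forall₂_nonneg (mem_pyProduct.mp hcs) ?_
    intro r hrm c hc
    rw [List.mem_map] at hrm
    obtain ⟨k, _, rfl⟩ := hrm
    exact (PySem.List.mem_pyRange_one.mp hc).1
  -- the pre-dedup list has no duplicates, so A's dedup pass is the identity
  have hesnd : es.Nodup := PySem.Set.nodup_ofList lst
  have hPnd : (pyProduct (bs.map (fun b => PySem.List.pyRange 0 b 1))).Nodup := by
    apply nodup_pyProduct
    intro r hrm
    rw [List.mem_map] at hrm
    obtain ⟨k, _, rfl⟩ := hrm
    exact PySem.List.nodup_pyRange_one _ _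
  have hnd : (((pyProduct (bs.map (fun b => PySem.List.pyRange 0 b 1))).filter
      (fun cs => cs.any (fun c => decide (c ≠ 0)))).map
      (fun cs => PySem.List.sorted (expnd es cs) (fun x => x) false)).Nodup := by
    apply List.Nodup.map_on _ (hPnd.filter _)
    intro x hx y hy hxy
    have hx' := List.mem_of_mem_filter hx
    have hy' := List.mem_of_mem_filter hy
    have hperm := (PySem.List.sorted_id_eq_sorted_id_iff_perm _ _).mp hxy
    exact expnd_inj hesnd (hlen x hx') (hlen y hy')
      (hnonneg x hx') (hnonneg y hy') hperm
  rw [foldl_dedup_of_nodup (by simpa using hnd), List.nil_append]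
  -- rewrite the product through mixed-radix decoding and drop the all-zero head
  rw [prod_decode bs hpos, List.filter_map, PySem.List.pyRange_one_cons (by omega)]
  have hhead : (decM bs 0).any (fun c => decide (c ≠ 0)) = false := by
    rw [decM_zero hpos]
    simp
  rw [List.filter_cons_of_neg (by simpa using hhead), zero_add]
  have htail : (PySem.List.pyRange 1 (prodl bs) 1).filter
      ((fun cs => cs.any (fun c => decide (c ≠ 0))) ∘ decM bs)
      = PySem.List.pyRange 1 (prodl bs) 1 := by
    apply List.filter_eq_self.mpr
    intro n hnm
    have hb := PySem.List.mem_pyRange_one.mp hnm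
    simp only [Function.comp_apply, List.any_eq_true, decide_eq_true_eq]
    by_contra hno
    push_neg at hno
    have : n = 0 := decM_eq_zero_imp hpos (by omega) hb.2 (by simpa using hno)
    omega
  rw [htail, List.map_map]
  -- B's side: total is prodl, and the divmod fold builds the same expansion
  have hTdef : bs.foldl (· * ·) 1 = prodl bs := rfl
  rw [hTdef]
  apply List.map_congr_left
  intro n hnm
  have hb := PySem.List.mem_pyRange_one.mp hnm
  have hzs : ∀ p ∈ es.reverse.zip bs.reverse, 0 < p.2 := by
    intro p hp
    exact hpos p.2 (by simpa using (List.of_mem_zip hp).2)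
  rw [foldB_spec _ hzs n (by omega)]
  rw [List.map_fst_zip (by simp [hlenbe]), List.map_snd_zip (by simp [hlenbe])]
  simp
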